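-- pv_equiv track=rewrite | github.com/qingtingjjjjjjj/Web-Scraping | .github/workflows/update_live_txt.py | update_group
-- ===== SOURCE A (Python) =====
-- def update_group(existing_lines, tag, new_records):
--     """在分组最前面插入新抓取源，按频道名覆盖上一次抓取的源"""
--     if tag not in existing_lines:
--         return existing_lines + ["", tag] + new_records + [""]
--
--     idx = existing_lines.index(tag) + 1
--     end_idx = idx
--     while end_idx < len(existing_lines) and existing_lines[end_idx].strip() != "" and not existing_lines[end_idx].endswith(",#genre#"):
--         end_idx += 1
--
--     group_lines = existing_lines[idx:end_idx]
--
--     new_names = {rec.split(",")[0] for rec in new_records}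
--     filtered_group = [line for line in group_lines if line.split(",")[0] not in new_names]
--
--     updated_group = new_records + filtered_group
--
--     return existing_lines[:idx] + updated_group + existing_lines[end_idx:]
-- ===== SOURCE B (Python) =====
-- def update_group(existing_lines, tag, new_records):
--     """Single forward pass with a 3-state machine instead of index arithmetic and slicing."""
--     if tag not in existing_lines:
--         return existing_lines + ["", tag] + new_records + [""]
--     new_names = {rec.split(",")[0] for rec in new_records}
--     out = []
--     state = 0  # 0 = before first tag, 1 = inside the group, 2 = after the group
--     for line in existing_lines:
--         if state == 0:
--             out.append(line)
--             if line == tag: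
--                 out.extend(new_records)
--                 state = 1
--         elif state == 1:
--             if line.strip() == "" or line.endswith(",#genre#"):
--                 out.append(line)
--                 state = 2
--             elif line.split(",")[0] not in new_names:
--                 out.append(line)
--         else:
--             out.append(line)
--     return out
-- ===== Notes on version B (the rewrite author's own statement) =====
-- stated objective: alternative
-- what changed: Replaced index search, a while-loop over indices and three slice concatenations by a single forward pass over the lines with a 3-state machine (before tag / inside group / after group) and an output accumulator.
import Mathlib
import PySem

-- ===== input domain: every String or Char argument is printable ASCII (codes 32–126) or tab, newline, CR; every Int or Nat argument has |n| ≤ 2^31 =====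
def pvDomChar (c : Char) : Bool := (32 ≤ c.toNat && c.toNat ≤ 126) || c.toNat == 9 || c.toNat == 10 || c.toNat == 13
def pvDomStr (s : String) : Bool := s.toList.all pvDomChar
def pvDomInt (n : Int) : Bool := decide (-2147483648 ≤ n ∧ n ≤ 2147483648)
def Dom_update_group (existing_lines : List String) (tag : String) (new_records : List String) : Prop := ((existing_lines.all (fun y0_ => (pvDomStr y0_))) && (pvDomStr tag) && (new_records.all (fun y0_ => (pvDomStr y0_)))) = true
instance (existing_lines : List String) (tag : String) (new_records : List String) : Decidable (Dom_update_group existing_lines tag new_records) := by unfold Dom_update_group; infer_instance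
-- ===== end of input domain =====

-- B is a single forward pass with a 3-state machine instead of A's index search, index
-- while-loop and slice concatenations (objective: alternative decomposition, same cost).

-- rec.split(",")[0]  (split on "," is never empty, so headD is exact)
def ugName (rec : String) : String := (((PySem.Str.split? rec ",").getD []).headD "")  -- sep ≠ "": split? is some, and never empty

-- ===== PORT A =====
-- the while loop: advance end_idx while in range, strip != "" and not endswith ",#genre#"
def ugFindEnd (lines : List String) (i : Nat) : Nat :=
  if i < lines.length then
    if (PySem.Str.strip (lines.getD i "") != "")
        && !(PySem.Str.endswith (lines.getD i "") ",#genre#") then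
      ugFindEnd lines (i + 1)
    else i
  else i
termination_by lines.length - i
decreasing_by omega

def update_group (existing_lines : List String) (tag : String) (new_records : List String) : List String :=
  if tag ∉ existing_lines then
    existing_lines ++ ["", tag] ++ new_records ++ [""]
  else
    let idx : Nat := (PySem.List.index? existing_lines tag).getD 0 + 1  -- in-range: tag ∈ existing_lines
    let end_idx : Nat := ugFindEnd existing_lines idx
    let group_lines := PySem.List.slice existing_lines (some (idx : Int)) (some (end_idx : Int))
    let new_names : PySem.Set String := PySem.Set.ofList (new_records.map ugName)
    let filtered_group := group_lines.filter (fun line => !(PySem.Set.contains new_names (ugName line)))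
    let updated_group := new_records ++ filtered_group
    PySem.List.slice existing_lines none (some (idx : Int)) ++ updated_group
      ++ PySem.List.slice existing_lines (some (end_idx : Int)) none

-- ===== PORT B =====
def ugBoundary (line : String) : Bool :=
  PySem.Str.strip line == "" || PySem.Str.endswith line ",#genre#"

-- the for-loop over the lines, with the state flag as an extra argument
def ugLoop (names : PySem.Set String) (new_records : List String) (tag : String) :
    Nat → List String → List String
  | _, [] => []
  | 0, line :: rest =>
      if line == tag then line :: (new_records ++ ugLoop names new_records tag 1 rest)
      else line :: ugLoop names new_records tag 0 rest
  | 1, line :: rest =>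
      if ugBoundary line then line :: ugLoop names new_records tag 2 rest
      else if PySem.Set.contains names (ugName line) then ugLoop names new_records tag 1 rest
      else line :: ugLoop names new_records tag 1 rest
  | _ + 2, line :: rest => line :: ugLoop names new_records tag 2 rest

def update_group_alt (existing_lines : List String) (tag : String) (new_records : List String) : List String :=
  if tag ∉ existing_lines then
    existing_lines ++ ["", tag] ++ new_records ++ [""]
  else
    ugLoop (PySem.Set.ofList (new_records.map ugName)) new_records tag 0 existing_lines

-- ===== PRECONDITION & SPEC =====
def Spec_update_group (existing_lines : List String) (tag : String) (new_records : List String) (out : List String) : Prop := out = update_group_alt existing_lines tag new_records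
instance (existing_lines : List String) (tag : String) (new_records : List String) (out : List String) : Decidable (Spec_update_group existing_lines tag new_records out) := by unfold Spec_update_group; infer_instance

-- ===== CLAIM (what is proved, stated in full; the proofs are below) =====
def Claim_equal_update_group : Prop := ∀ (existing_lines : List String) (tag : String) (new_records : List String), Dom_update_group existing_lines tag new_records → Spec_update_group existing_lines tag new_records (update_group existing_lines tag new_records)

-- ===== LEMMAS AND PROOFS =====

-- A's loop condition is the negation of B's boundary test
lemma ug_cond_eq (x : String) :
    ((PySem.Str.strip x != "") && !(PySem.Str.endswith x ",#genre#")) = !ugBoundary x := by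
  simp only [ugBoundary, Bool.not_or, bne]

lemma ugFindEnd_eq (lines : List String) (i : Nat) :
    ugFindEnd lines i = i + ((lines.drop i).takeWhile (fun l => !ugBoundary l)).length := by
  rw [ugFindEnd]
  by_cases h : i < lines.length
  · have hget : lines.getD i "" = lines[i] := List.getD_eq_getElem lines "" h
    rw [if_pos h, hget, ug_cond_eq, List.drop_eq_getElem_cons h]
    by_cases hc : ugBoundary lines[i]
    · rw [if_neg (by simp [hc]), List.takeWhile_cons, if_neg (by simp [hc])]
      simp
    · rw [if_pos (by simp [hc]), ugFindEnd_eq lines (i + 1), List.takeWhile_cons,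
        if_pos (by simp [hc])]
      simp only [List.length_cons]
      omega
  · rw [if_neg h]
    simp [List.drop_eq_nil_iff.mpr (le_of_not_gt h)]
termination_by lines.length - i
decreasing_by omega

lemma ugLoop_state2 (names : PySem.Set String) (recs : List String) (tag : String)
    (l : List String) : ugLoop names recs tag 2 l = l := by
  induction l with
  | nil => rfl
  | cons x xs ih => simp [ugLoop, ih]

lemma ugLoop_state1 (names : PySem.Set String) (recs : List String) (tag : String)
    (l : List String) :
    ugLoop names recs tag 1 l =
      (l.takeWhile (fun x => !ugBoundary x)).filter
          (fun x => !(PySem.Set.contains names (ugName x)))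
        ++ l.dropWhile (fun x => !ugBoundary x) := by
  induction l with
  | nil => rfl
  | cons x xs ih =>
    by_cases hb : ugBoundary x
    · simp [ugLoop, hb, ugLoop_state2]
    · by_cases hc : ugName x ∈ names <;>
        simp [ugLoop, hb, hc, ih, PySem.Set.contains]

lemma ugLoop_state0 (names : PySem.Set String) (recs : List String) (tag : String)
    (pre suf : List String) (hpre : tag ∉ pre) :
    ugLoop names recs tag 0 (pre ++ tag :: suf) =
      pre ++ tag :: (recs ++ ugLoop names recs tag 1 suf) := by
  induction pre with
  | nil => simp [ugLoop]
  | cons x xs ih =>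
    have hx : x ≠ tag := fun h => hpre (h ▸ List.mem_cons_self)
    simp only [List.cons_append, ugLoop, beq_iff_eq, if_neg hx]
    rw [ih (fun h => hpre (List.mem_cons_of_mem _ h))]

lemma take_takeWhile_len {α : Type} (p : α → Bool) (l : List α) :
    l.take (l.takeWhile p).length = l.takeWhile p := by
  induction l with
  | nil => rfl
  | cons x xs ih =>
    rw [List.takeWhile_cons]
    by_cases hp : p x <;> simp [hp, ih]

lemma drop_takeWhile_len {α : Type} (p : α → Bool) (l : List α) :
    l.drop (l.takeWhile p).length = l.dropWhile p := by
  induction l with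
  | nil => rfl
  | cons x xs ih =>
    rw [List.takeWhile_cons, List.dropWhile_cons]
    by_cases hp : p x <;> simp [hp, ih]

-- ===== VERDICT (by name: the statement is the Claim_ definition above) =====
theorem update_group_spec : Claim_equal_update_group := by
  intro lines tag recs _
  unfold Spec_update_group update_group update_group_alt
  by_cases hmem : tag ∈ lines
  · simp only [hmem, not_true_eq_false, if_false]
    obtain ⟨k, hk⟩ := Option.isSome_iff_exists.mp ((PySem.List.index?_isSome_iff lines tag).mpr hmem)
    obtain ⟨pre, suf, hsplit, hlen, hpre⟩ := (PySem.List.index?_eq_some_iff lines tag k).mp hk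
    subst hlen
    have hdrop : lines.drop (pre.length + 1) = suf := by
      rw [hsplit, show pre ++ tag :: suf = (pre ++ [tag]) ++ suf by simp,
        List.drop_left' (by simp)]
    have htake : lines.take (pre.length + 1) = pre ++ [tag] := by
      rw [hsplit, show pre ++ tag :: suf = (pre ++ [tag]) ++ suf by simp,
        List.take_left' (by simp)]
    have hend : ugFindEnd lines (pre.length + 1) =
        (pre.length + 1) + ((suf.takeWhile (fun l => !ugBoundary l)).length) := by
      rw [ugFindEnd_eq, hdrop]
    rw [hk]
    simp only [Option.getD_some, hend,
      PySem.List.slice_to_natCast, PySem.List.slice_from_natCast]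
    rw [PySem.List.slice_natCast, htake, hdrop]
    rw [show pre.length + 1 + (suf.takeWhile (fun l => !ugBoundary l)).length - (pre.length + 1)
        = (suf.takeWhile (fun l => !ugBoundary l)).length by omega]
    rw [show lines.drop (pre.length + 1 + (suf.takeWhile (fun l => !ugBoundary l)).length)
        = suf.drop ((suf.takeWhile (fun l => !ugBoundary l)).length) by
      rw [← hdrop, List.drop_drop]]
    rw [take_takeWhile_len, drop_takeWhile_len]
    rw [hsplit, ugLoop_state0 _ _ _ _ _ hpre, ugLoop_state1]
    simp
  · simp [hmem]
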